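-- pv_equiv track=rewrite | github.com/nikitautiu/ubb | IA/lab2/probs.py | sw_dist
-- ===== SOURCE A (Python) =====
-- def sw_dist(vect1, vect2):
--     """Return the Smith-Watermann distance between 2 vectors"""
--
--     s = [[0 for i in range(len(vect2))] for j in range(len(vect1))]
--     for i in range(len(vect1)):
--         for j in range(len(vect2)):
--
--             if vect1[i] == vect2[j]:
--                 s[i][j] = 1
--             else:
--                 s[i][j] = -1
--
--     h = [[0 for i in range(len(vect2) + 1)] for j in range(len(vect1) + 1)]
--     for i in range(1, len(vect1) + 1):
--         for j in range(1, len(vect2) + 1):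
--             term1 = h[i-1][j-1] + s[i-1][j-1]
--             term2 = max([h[i-k][j] - k for k in range(1, i + 1)] or [0])
--             term3 = max([h[i][j-l] - l for l in range(1, j + 1)] or [0])
--             h[i][j] = max([term1, term2, term3, 0])
--
--     return max([max(line) for line in h])
-- ===== SOURCE B (Python) =====
-- def sw_dist(vect1, vect2):
--     """Return the Smith-Watermann distance between 2 vectors"""
--     m = len(vect2)
--     prev = [0] * (m + 1)      # previous DP row
--     f = [0] * (m + 1)         # running column-gap maxima
--     best = 0
--     for a in vect1:
--         cur = [0]
--         e = 0                 # running row-gap maximum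
--         left = 0
--         for j, b in enumerate(vect2, 1):
--             f[j] = max(prev[j], f[j]) - 1
--             diag = prev[j - 1] + (1 if a == b else -1)
--             e = max(left, e) - 1
--             val = max(diag, f[j], e, 0)
--             cur.append(val)
--             left = val
--             best = max(best, val)
--         prev = cur
--     return best
-- ===== Notes on version B (the rewrite author's own statement) =====
-- stated objective: faster
-- what changed: Replaced the cubic/quartic recomputation of the two gap terms (a fresh max over all k previous rows and all l previous columns for every cell, plus a full scan of the whole matrix at the end) by the classic linear-gap Smith-Waterman recurrence: one running column-gap maximum per column and one running row-gap maximum per row, updated in O(1) per cell, with the best score tracked on the fly and only two rows kept.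
import Mathlib
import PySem

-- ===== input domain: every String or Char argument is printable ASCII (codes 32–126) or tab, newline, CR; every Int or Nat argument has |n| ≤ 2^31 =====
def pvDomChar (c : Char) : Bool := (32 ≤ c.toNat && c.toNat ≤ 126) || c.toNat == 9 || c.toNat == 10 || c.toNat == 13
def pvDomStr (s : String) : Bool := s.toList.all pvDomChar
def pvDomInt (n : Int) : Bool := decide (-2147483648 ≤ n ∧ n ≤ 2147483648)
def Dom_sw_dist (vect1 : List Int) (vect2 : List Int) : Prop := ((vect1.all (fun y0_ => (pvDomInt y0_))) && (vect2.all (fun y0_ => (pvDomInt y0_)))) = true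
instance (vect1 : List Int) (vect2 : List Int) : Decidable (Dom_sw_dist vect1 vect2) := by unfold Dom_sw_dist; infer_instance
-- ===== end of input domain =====

-- B replaces A's per-cell maxima over all previous rows/columns (O(n^2 m + n m^2)) by the
-- linear-gap DP recurrence with incremental running gap maxima (O(n m)); same return value.

-- ===== PORT A =====
-- max(xs) on a nonempty list; on [] it is Python's max(xs or [0]) = 0 (A only ever takes
-- max of [..] or [0] / of nonempty lists, so this is exact).
def pvListMax (xs : List Int) : Int :=
  match xs with
  | [] => 0
  | x :: rest => rest.foldl max x

-- h[i][j] for in-range nonnegative indices (A only indexes in range)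
def pvGet2 (h : List (List Int)) (i j : Nat) : Int := (h.getD i []).getD j 0

-- body of A's inner loop: one assignment h[i][j] = max([term1, term2, term3, 0])
def pvCellA (s : List (List Int)) (i : Nat) (h : List (List Int)) (j0 : Nat) : List (List Int) :=
  let j := j0 + 1
  let term1 := pvGet2 h (i-1) (j-1) + pvGet2 s (i-1) (j-1)
  let term2 := pvListMax ((List.range i).map (fun k0 => pvGet2 h (i-(k0+1)) j - ((k0:Int)+1)))
  let term3 := pvListMax ((List.range j).map (fun l0 => pvGet2 h i (j-(l0+1)) - ((l0:Int)+1)))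
  h.set i ((h.getD i []).set j (pvListMax [term1, term2, term3, 0]))

-- A's inner "for j in range(1, len(vect2)+1)" loop
def pvInnerA (s : List (List Int)) (i : Nat) (m : Nat) (h : List (List Int)) : List (List Int) :=
  (List.range m).foldl (pvCellA s i) h

-- A's similarity matrix s
def pvSmat (vect1 : List Int) (vect2 : List Int) : List (List Int) :=
  (List.range vect1.length).map (fun i => (List.range vect2.length).map (fun j =>
      if vect1.getD i 0 = vect2.getD j 0 then (1:Int) else -1))

def sw_dist (vect1 : List Int) (vect2 : List Int) : Int :=
  let n := vect1.length
  let m := vect2.length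
  let s := pvSmat vect1 vect2
  let h0 := List.replicate (n+1) (List.replicate (m+1) (0:Int))
  let h := (List.range n).foldl (fun h i0 => pvInnerA s (i0+1) m h) h0
  pvListMax (h.map pvListMax)

-- ===== PORT B =====
-- body of B's inner loop; state = (f, cur, e, left, best)
def pvCellB (a : Int) (prev : List Int) (t : List Int × List Int × Int × Int × Int)
    (jb : Int × Int) : List Int × List Int × Int × Int × Int :=
  let j := jb.1.toNat
  let fj := max (prev.getD j 0) (t.1.getD j 0) - 1
  let f' := t.1.set j fj
  let diag := prev.getD (j-1) 0 + (if a = jb.2 then (1:Int) else -1)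
  let e' := max t.2.2.2.1 t.2.2.1 - 1
  let val := max (max diag fj) (max e' 0)
  (f', t.2.1 ++ [val], e', val, max t.2.2.2.2 val)

-- B's "for j, b in enumerate(vect2, 1)" loop
def pvRowB (a : Int) (vect2 : List Int) (prev : List Int) (f : List Int) (best : Int) :
    List Int × List Int × Int × Int × Int :=
  (PySem.List.enumerate vect2 1).foldl (pvCellB a prev) (f, [0], 0, 0, best)

def sw_dist_alt (vect1 : List Int) (vect2 : List Int) : Int :=
  let m := vect2.length
  let st := vect1.foldl (fun st a =>
      let r := pvRowB a vect2 st.1 st.2.1 st.2.2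
      (r.2.1, r.1, r.2.2.2.2))
    (List.replicate (m+1) (0:Int), List.replicate (m+1) (0:Int), (0:Int))
  st.2.2

-- ===== PRECONDITION & SPEC =====
def Spec_sw_dist (vect1 : List Int) (vect2 : List Int) (out : Int) : Prop := out = sw_dist_alt vect1 vect2
instance (vect1 : List Int) (vect2 : List Int) (out : Int) : Decidable (Spec_sw_dist vect1 vect2 out) := by unfold Spec_sw_dist; infer_instance

-- ===== CLAIM (what is proved, stated in full; the proofs are below) =====
def Claim_equal_sw_dist : Prop := ∀ (vect1 : List Int) (vect2 : List Int), Dom_sw_dist vect1 vect2 → Spec_sw_dist vect1 vect2 (sw_dist vect1 vect2)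

-- ===== LEMMAS AND PROOFS =====

-- B's running gap maximum: pvFB g 0 = 0, pvFB g (i+1) = max (g i) (pvFB g i) - 1
def pvFB (g : Nat → Int) : Nat → Int
  | 0 => 0
  | (i+1) => max (g i) (pvFB g i) - 1

lemma pvFoldlMax_shift (t : List Int) : ∀ a y : Int, t.foldl max (max a y) = max a (t.foldl max y) := by
  induction t with
  | nil => intro a y; rfl
  | cons x r ih => intro a y; simp only [List.foldl_cons, max_assoc]; exact ih a (max y x)

lemma pvListMax_cons (a : Int) {ys : List Int} (h : ys ≠ []) :
    pvListMax (a :: ys) = max a (pvListMax ys) := by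
  cases ys with
  | nil => cases h rfl
  | cons y t => simp only [pvListMax, List.foldl_cons]; exact pvFoldlMax_shift t a y

lemma pvListMax_snoc (ys : List Int) (h : ys ≠ []) (v : Int) :
    pvListMax (ys ++ [v]) = max (pvListMax ys) v := by
  cases ys with
  | nil => cases h rfl
  | cons y t => simp [pvListMax, List.foldl_append]

lemma pvFoldlMax_sub_one (t : List Int) : ∀ a : Int, (t.map (fun x => x - 1)).foldl max (a - 1) = t.foldl max a - 1 := by
  induction t with
  | nil => intro a; rfl
  | cons x r ih => intro a; simp only [List.map_cons, List.foldl_cons, max_sub_sub_right]; exact ih (max a x)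

lemma pvListMax_map_sub_one {ys : List Int} (h : ys ≠ []) :
    pvListMax (ys.map (fun x => x - 1)) = pvListMax ys - 1 := by
  cases ys with
  | nil => cases h rfl
  | cons y t => simp only [List.map_cons, pvListMax]; exact pvFoldlMax_sub_one t y

lemma pvFoldlMax_absorb (l : List Int) : ∀ b c : Int, c ≤ b → l.foldl max b = max b (l.foldl max c) := by
  induction l with
  | nil => intro b c h; simp [max_eq_left h]
  | cons x r ih =>
    intro b c h
    simp only [List.foldl_cons]
    rw [ih (max b x) (max c x) (max_le_max_right x h)]
    have hx : x ≤ r.foldl max (max c x) :=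
      le_trans (le_max_right c x) (PySem.List.le_foldl_max r (max c x)).1
    rw [max_assoc, max_eq_right hx, ← pvFoldlMax_shift]

lemma pvFB_congr (g g' : Nat → Int) : ∀ i, (∀ k, k < i → g k = g' k) → pvFB g i = pvFB g' i := by
  intro i
  induction i with
  | zero => intro _; rfl
  | succ i ih =>
    intro h
    simp only [pvFB, h i (Nat.lt_succ_self i), ih (fun k hk => h k (Nat.lt_succ_of_lt hk))]

lemma pvGM_eq (g : Nat → Int) (hg : g 0 = 0) : ∀ i : Nat,
    pvListMax ((List.range (i+1)).map (fun k0 => g (i - k0) - ((k0:Int)+1))) = pvFB g (i+1) := by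
  intro i
  induction i with
  | zero => simp [pvListMax, pvFB, hg]
  | succ i ih =>
    have hr : List.range (i+2) = 0 :: (List.range (i+1)).map (· + 1) := by
      simpa [Nat.succ_eq_add_one] using (List.range_succ_eq_map (n := i+1))
    rw [hr]
    simp only [List.map_cons, List.map_map]
    have hmap : ((List.range (i+1)).map ((fun k0 => g (i + 1 - k0) - ((k0:Int)+1)) ∘ (· + 1)))
        = ((List.range (i+1)).map (fun k0 => g (i - k0) - ((k0:Int)+1))).map (fun x => x - 1) := by
      rw [List.map_map]
      apply List.map_congr_left
      intro k0 _
      simp only [Function.comp]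
      have : i + 1 - (k0 + 1) = i - k0 := by omega
      rw [this]
      push_cast
      ring
    rw [hmap, pvListMax_cons _ (by simp), pvListMax_map_sub_one (by simp), ih]
    show max (g (i+1) - 1) (pvFB g (i+1) - 1) = pvFB g (i+2)
    rw [max_sub_sub_right]
    rfl

lemma pvListMax_replicate_zero (m : Nat) : pvListMax (List.replicate (m+1) (0:Int)) = 0 := by
  induction m with
  | zero => rfl
  | succ m ih =>
    have : List.replicate (m+2) (0:Int) = 0 :: List.replicate (m+1) 0 := rfl
    rw [this, pvListMax_cons _ (by simp), ih]
    simp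

-- A's partially executed inner loop (first u of the m cell assignments of row t+1)
def pvAState (s : List (List Int)) (t : Nat) (M : List (List Int)) (u : Nat) : List (List Int) :=
  (List.range u).foldl (pvCellA s (t+1)) M

-- B's partially executed inner loop (first u of the m steps)
def pvBState (a : Int) (vect2 : List Int) (prev f : List Int) (best : Int) (u : Nat) :
    List Int × List Int × Int × Int × Int :=
  (PySem.List.enumerate (vect2.take u) 1).foldl (pvCellB a prev) (f, [0], 0, 0, best)

lemma pvAState_succ (s : List (List Int)) (t : Nat) (M : List (List Int)) (u : Nat) :
    pvAState s t M (u+1) = pvCellA s (t+1) (pvAState s t M u) u := by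
  unfold pvAState
  rw [List.range_succ, List.foldl_append]
  rfl

lemma pvBState_succ (a : Int) (vect2 : List Int) (prev f : List Int) (best : Int) (u : Nat)
    (hu : u < vect2.length) :
    pvBState a vect2 prev f best (u+1)
      = pvCellB a prev (pvBState a vect2 prev f best u) (1 + (u:Int), vect2[u]) := by
  unfold pvBState
  rw [List.take_add_one, List.getElem?_eq_getElem hu]
  show (PySem.List.enumerate (vect2.take u ++ [vect2[u]]) 1).foldl (pvCellB a prev) _ = _
  rw [PySem.List.enumerate_append, List.foldl_append]
  simp [List.length_take, Nat.min_eq_left (le_of_lt hu),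
        PySem.List.enumerate_cons, PySem.List.enumerate_nil]

-- the inner-loop simulation: after u steps, A has filled cells 1..u of row t+1 with
-- values vals, and B's state (f, cur, e, left, best) carries exactly those values
-- together with the running gap maxima.
lemma pv_inner_sim
    (a : Int) (vect2 : List Int) (s : List (List Int)) (t : Nat)
    (R : List (List Int)) (Z : Nat)
    (hRlen : R.length = t + 1)
    (hR0 : R.getD 0 [] = List.replicate (vect2.length + 1) (0:Int))
    (hs : ∀ j0, j0 < vect2.length → pvGet2 s t j0 = if a = vect2.getD j0 0 then 1 else -1)
    (f : List Int) (best : Int)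
    (hflen : f.length = vect2.length + 1)
    (hf : ∀ j, 1 ≤ j → j ≤ vect2.length → f.getD j 0 = pvFB (fun k => pvGet2 R k j) t) :
    ∀ u, u ≤ vect2.length →
    ∃ vals : List Int, vals.length = u ∧
      (pvAState s t (R ++ (List.replicate (vect2.length+1) (0:Int)) :: List.replicate Z (List.replicate (vect2.length+1) (0:Int))) u
        = R ++ ((0 :: vals ++ List.replicate (vect2.length - u) 0) :: List.replicate Z (List.replicate (vect2.length+1) (0:Int)))) ∧
      ((pvBState a vect2 (R.getD t []) f best u).2.1 = 0 :: vals ∧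
       (pvBState a vect2 (R.getD t []) f best u).1.length = vect2.length + 1 ∧
       (∀ j, 1 ≤ j → j ≤ vect2.length →
         (pvBState a vect2 (R.getD t []) f best u).1.getD j 0
           = if j ≤ u then pvFB (fun k => pvGet2 R k j) (t+1) else pvFB (fun k => pvGet2 R k j) t) ∧
       (pvBState a vect2 (R.getD t []) f best u).2.2.1 = pvFB (fun l => (0 :: vals).getD l 0) u ∧
       (pvBState a vect2 (R.getD t []) f best u).2.2.2.1 = (0 :: vals).getD u 0 ∧
       (pvBState a vect2 (R.getD t []) f best u).2.2.2.2 = vals.foldl max best) := by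
  intro u
  induction u with
  | zero =>
    intro _
    refine ⟨[], rfl, ?_, ?_, ?_, ?_, ?_, ?_, ?_⟩
    · show _ = R ++ ((0 :: [] ++ List.replicate (vect2.length - 0) 0) :: _)
      have : (0 : Int) :: ([] : List Int) ++ List.replicate (vect2.length - 0) (0:Int)
          = List.replicate (vect2.length + 1) (0:Int) := by
        simp [List.replicate_succ]
      rw [this]
      rfl
    · rfl
    · exact hflen
    · intro j h1 h2
      simp only [Nat.le_zero]
      rw [if_neg (by omega)]
      exact hf j h1 h2
    · rfl
    · rfl
    · rfl
  | succ u ih =>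
    intro hu1
    have hu : u < vect2.length := hu1
    obtain ⟨vals, hlen, hA, hcur, hflen', hfv, he, hleft, hbest⟩ := ih (le_of_lt hu)
    -- abbreviations
    set M := vect2.length with hM
    have hvalsne : (0 : Int) :: vals ≠ [] := by simp
    -- the new cell value, in A's form
    -- g for the column u+1, c for the current row
    set g : Nat → Int := fun k => pvGet2 R k (u+1) with hg
    set c : Nat → Int := fun l => (0 :: vals).getD l 0 with hc
    have hg0 : g 0 = 0 := by
      simp only [hg, pvGet2, hR0]
      simp
    have hc0 : c 0 = 0 := rfl
    set prev := R.getD t [] with hprev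
    set zrow := List.replicate (M+1) (0:Int) with hzrow
    set Zs := List.replicate Z zrow with hZs
    set rowu : List Int := 0 :: (vals ++ List.replicate (M - u) 0) with hrowu
    set stu := pvBState a vect2 prev f best u with hstu
    have hrowu' : rowu = (0 :: vals) ++ List.replicate (M - u) 0 := by simp [hrowu]
    have hrowlen : (0 :: vals).length = u + 1 := by simp [hlen]
    have hRlen' : R.length = t + 1 := hRlen
    -- row accesses into the partially updated matrix
    have hMatR : ∀ (k : Nat), k < t+1 → ∀ x, pvGet2 (R ++ rowu :: Zs) k x = pvGet2 R k x := by
      intro k hk x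
      simp only [pvGet2]
      rw [List.getD_append _ _ _ _ (by omega : k < R.length)]
    have hMatrow : (R ++ rowu :: Zs).getD (t+1) [] = rowu := by
      rw [List.getD_append_right _ _ _ _ (by omega : R.length ≤ t+1)]
      simp [hRlen']
    have hrowu_get : ∀ x, x < u+1 → rowu.getD x 0 = c x := by
      intro x hx
      rw [hrowu', List.getD_append _ _ _ _ (by omega : x < (0 :: vals).length)]
    -- the three terms of A, in closed form
    have hterm2 : pvListMax ((List.range (t+1)).map
        (fun k0 => pvGet2 (R ++ rowu :: Zs) (t+1-(k0+1)) (u+1) - ((k0:Int)+1))) = pvFB g (t+1) := by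
      have hcong : (List.range (t+1)).map
            (fun k0 => pvGet2 (R ++ rowu :: Zs) (t+1-(k0+1)) (u+1) - ((k0:Int)+1))
          = (List.range (t+1)).map (fun k0 => g (t - k0) - ((k0:Int)+1)) := by
        apply List.map_congr_left
        intro k0 hk0
        rw [List.mem_range] at hk0
        have h1 : t+1-(k0+1) = t - k0 := by omega
        rw [h1, hMatR (t-k0) (by omega)]
      rw [hcong, pvGM_eq g hg0 t]
    have hterm3 : pvListMax ((List.range (u+1)).map
        (fun l0 => pvGet2 (R ++ rowu :: Zs) (t+1) (u+1-(l0+1)) - ((l0:Int)+1))) = pvFB c (u+1) := by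
      have hcong : (List.range (u+1)).map
            (fun l0 => pvGet2 (R ++ rowu :: Zs) (t+1) (u+1-(l0+1)) - ((l0:Int)+1))
          = (List.range (u+1)).map (fun l0 => c (u - l0) - ((l0:Int)+1)) := by
        apply List.map_congr_left
        intro l0 hl0
        rw [List.mem_range] at hl0
        have h1 : u+1-(l0+1) = u - l0 := by omega
        rw [h1]
        simp only [pvGet2]
        rw [hMatrow, hrowu_get (u - l0) (by omega)]
      rw [hcong, pvGM_eq c hc0 u]
    -- the new cell value
    set v : Int := max (max (pvGet2 R t u + (if a = vect2[u] then (1:Int) else -1)) (pvFB g (t+1)))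
        (max (pvFB c (u+1)) 0) with hv
    -- B's step, in closed form
    have hstep := pvBState_succ a vect2 prev f best u hu
    have hj1 : ((1:Int) + (u:Int)).toNat = u + 1 := by omega
    have hprevu1 : prev.getD (u+1) 0 = g t := rfl
    have hprevu : prev.getD u 0 = pvGet2 R t u := rfl
    have hfold : stu.1.getD (u+1) 0 = pvFB g t := by
      rw [hfv (u+1) (by omega) (by omega), if_neg (by omega)]
    have hFBg : pvFB g (t+1) = max (g t) (pvFB g t) - 1 := rfl
    have hFBc : pvFB c (u+1) = max (c u) (pvFB c u) - 1 := rfl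
    have hB : pvBState a vect2 prev f best (u+1)
        = (stu.1.set (u+1) (pvFB g (t+1)), 0 :: (vals ++ [v]), pvFB c (u+1), v,
           max (vals.foldl max best) v) := by
      rw [hstep]
      show pvCellB a prev stu (1 + (u:Int), vect2[u]) = _
      simp only [pvCellB, hj1, Nat.add_sub_cancel]
      rw [hcur, hfold, hprevu1, hprevu, he, hleft, hbest, ← hFBg]
      have hcu : (0 :: vals).getD u 0 = c u := rfl
      rw [hcu, ← hFBc, ← hv]
      simp
    refine ⟨vals ++ [v], by simp [hlen], ?_, ?_, ?_, ?_, ?_, ?_, ?_⟩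
    · -- A's matrix after u+1 steps
      rw [pvAState_succ, hA]
      show pvCellA s (t+1) (R ++ rowu :: Zs) u
          = R ++ ((0 :: (vals ++ [v] ++ List.replicate (M - (u+1)) 0)) :: Zs)
      unfold pvCellA
      simp only [Nat.add_sub_cancel]
      rw [hterm2, hterm3, hMatR t (by omega) u, hMatrow]
      rw [hs u hu, List.getD_eq_getElem vect2 0 hu]
      have hvv : pvListMax [pvGet2 R t u + (if a = vect2[u] then (1:Int) else -1),
          pvFB g (t+1), pvFB c (u+1), 0] = v := by
        rw [hv]
        show max (max (max _ _) _) 0 = _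
        rw [max_assoc]
      rw [hvv]
      -- the row update
      have hsetrow : rowu.set (u+1) v = 0 :: (vals ++ [v] ++ List.replicate (M - (u+1)) 0) := by
        rw [hrowu', List.set_append_right _ _ (by omega : (0 :: vals).length ≤ u+1)]
        have hMu : M - u = (M - (u+1)) + 1 := by omega
        rw [hrowlen, Nat.sub_self, hMu, List.replicate_succ]
        simp
      rw [hsetrow, List.set_append_right _ _ (by omega : R.length ≤ t+1)]
      rw [hRlen', Nat.sub_self]
      rfl
    · rw [hB]
    · rw [hB]
      simp only [List.length_set]
      exact hflen'
    · intro j h1 h2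
      rw [hB]
      by_cases hj' : j = u + 1
      · subst hj'
        simp only
        rw [List.getD_eq_getElem _ _ (by simp [hflen']; omega), List.getElem_set_self (by simp [hflen']; omega)]
        rw [if_pos (by omega)]
      · simp only
        have hne : u + 1 ≠ j := fun h => hj' h.symm
        rw [show (stu.1.set (u+1) (pvFB g (t+1))).getD j 0 = stu.1.getD j 0 by
              simp [List.getD, List.getElem?_set_ne hne]]
        rw [hfv j h1 h2]
        have hiff : (j ≤ u + 1) ↔ (j ≤ u) := by omega
        simp only [hiff]
    · rw [hB]
      simp only
      apply pvFB_congr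
      intro k hk
      have : (0 : Int) :: (vals ++ [v]) = (0 :: vals) ++ [v] := by simp
      rw [this, List.getD_append _ _ _ _ (by omega : k < (0 :: vals).length)]
    · rw [hB]
      simp only
      have : (0 : Int) :: (vals ++ [v]) = (0 :: vals) ++ [v] := by simp
      rw [this, List.getD_append_right _ _ _ _ (by omega : (0 :: vals).length ≤ u+1)]
      rw [hrowlen, Nat.sub_self]
      rfl
    · rw [hB]
      simp [List.foldl_append]

lemma pvSmat_get (vect1 vect2 : List Int) (t j0 : Nat) (ht : t < vect1.length)
    (hj : j0 < vect2.length) :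
    pvGet2 (pvSmat vect1 vect2) t j0 = if vect1[t] = vect2.getD j0 0 then 1 else -1 := by
  simp [pvSmat, pvGet2, List.getD, ht, hj]

-- A's outer loop after t of the n rows
def pvAOuter (vect1 vect2 : List Int) (t : Nat) : List (List Int) :=
  (List.range t).foldl (fun h i0 => pvInnerA (pvSmat vect1 vect2) (i0+1) vect2.length h)
    (List.replicate (vect1.length+1) (List.replicate (vect2.length+1) (0:Int)))

-- B's outer loop after t of the n rows
def pvBOuter (vect1 vect2 : List Int) (t : Nat) : List Int × List Int × Int :=
  (vect1.take t).foldl (fun st a =>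
      let r := pvRowB a vect2 st.1 st.2.1 st.2.2
      (r.2.1, r.1, r.2.2.2.2))
    (List.replicate (vect2.length+1) (0:Int), List.replicate (vect2.length+1) (0:Int), (0:Int))

lemma pvAOuter_succ (vect1 vect2 : List Int) (t : Nat) :
    pvAOuter vect1 vect2 (t+1)
      = pvInnerA (pvSmat vect1 vect2) (t+1) vect2.length (pvAOuter vect1 vect2 t) := by
  unfold pvAOuter
  rw [List.range_succ, List.foldl_append]
  rfl

lemma pvBOuter_succ (vect1 vect2 : List Int) (t : Nat) (ht : t < vect1.length) :
    pvBOuter vect1 vect2 (t+1)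
      = (let r := pvRowB vect1[t] vect2 (pvBOuter vect1 vect2 t).1
              (pvBOuter vect1 vect2 t).2.1 (pvBOuter vect1 vect2 t).2.2
         ((r.2.1, r.1, r.2.2.2.2) : List Int × List Int × Int)) := by
  unfold pvBOuter
  rw [List.take_add_one, List.getElem?_eq_getElem ht]
  show ((vect1.take t ++ [vect1[t]]).foldl _ _) = _
  rw [List.foldl_append]
  rfl

-- the outer simulation invariant: after t rows, A's matrix is the computed rows R followed
-- by untouched zero rows, and B's state is (last row of R, the column gap maxima, max of R)
lemma pv_outer_sim (vect1 vect2 : List Int) : ∀ t, t ≤ vect1.length →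
    ∃ R : List (List Int),
      R.length = t + 1 ∧
      R.getD 0 [] = List.replicate (vect2.length + 1) (0:Int) ∧
      pvAOuter vect1 vect2 t
        = R ++ List.replicate (vect1.length - t) (List.replicate (vect2.length+1) (0:Int)) ∧
      (pvBOuter vect1 vect2 t).1 = R.getD t [] ∧
      (pvBOuter vect1 vect2 t).2.1.length = vect2.length + 1 ∧
      (∀ j, 1 ≤ j → j ≤ vect2.length →
        (pvBOuter vect1 vect2 t).2.1.getD j 0 = pvFB (fun k => pvGet2 R k j) t) ∧
      (pvBOuter vect1 vect2 t).2.2 = pvListMax (R.map pvListMax) := by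
  intro t
  induction t with
  | zero =>
    intro _
    refine ⟨[List.replicate (vect2.length + 1) (0:Int)], rfl, rfl, ?_, rfl, by simp [pvBOuter], ?_, ?_⟩
    · show List.replicate (vect1.length + 1) _ = _
      rw [List.replicate_succ]
      simp
    · intro j _ _
      simp [pvBOuter, pvFB]
    · show (0:Int) = pvListMax [pvListMax (List.replicate (vect2.length + 1) (0:Int))]
      rw [pvListMax_replicate_zero]
      rfl
  | succ t ih =>
    intro ht1
    have ht : t < vect1.length := ht1
    obtain ⟨R, hRlen, hR0, hA, hprev, hflen, hfv, hbest⟩ := ih (le_of_lt ht)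
    have hs : ∀ j0, j0 < vect2.length →
        pvGet2 (pvSmat vect1 vect2) t j0 = if vect1[t] = vect2.getD j0 0 then 1 else -1 :=
      fun j0 hj => pvSmat_get vect1 vect2 t j0 ht hj
    obtain ⟨vals, hvlen, hIA, hcur, hflen', hfv', _, _, hbest'⟩ :=
      pv_inner_sim vect1[t] vect2 (pvSmat vect1 vect2) t R (vect1.length - t - 1)
        hRlen hR0 hs (pvBOuter vect1 vect2 t).2.1 (pvBOuter vect1 vect2 t).2.2 hflen hfv
        vect2.length (le_refl _)
    -- B's step, routed through pvBState
    have hrowB : pvRowB vect1[t] vect2 (pvBOuter vect1 vect2 t).1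
          (pvBOuter vect1 vect2 t).2.1 (pvBOuter vect1 vect2 t).2.2
        = pvBState vect1[t] vect2 (R.getD t []) (pvBOuter vect1 vect2 t).2.1
            (pvBOuter vect1 vect2 t).2.2 vect2.length := by
      rw [hprev]
      unfold pvRowB pvBState
      rw [List.take_length]
    have hBstep := pvBOuter_succ vect1 vect2 t ht
    rw [hrowB] at hBstep
    have hB1 : (pvBOuter vect1 vect2 (t+1)).1
        = (pvBState vect1[t] vect2 (R.getD t []) (pvBOuter vect1 vect2 t).2.1
            (pvBOuter vect1 vect2 t).2.2 vect2.length).2.1 := by rw [hBstep]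
    have hB2 : (pvBOuter vect1 vect2 (t+1)).2.1
        = (pvBState vect1[t] vect2 (R.getD t []) (pvBOuter vect1 vect2 t).2.1
            (pvBOuter vect1 vect2 t).2.2 vect2.length).1 := by rw [hBstep]
    have hB3 : (pvBOuter vect1 vect2 (t+1)).2.2
        = (pvBState vect1[t] vect2 (R.getD t []) (pvBOuter vect1 vect2 t).2.1
            (pvBOuter vect1 vect2 t).2.2 vect2.length).2.2.2.2 := by rw [hBstep]
    refine ⟨R ++ [0 :: vals], by simp [hRlen], ?_, ?_, ?_, ?_, ?_, ?_⟩
    · rw [List.getD_append _ _ _ _ (by omega)]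
      exact hR0
    · rw [pvAOuter_succ, hA]
      have hnt : vect1.length - t = (vect1.length - t - 1) + 1 := by omega
      rw [hnt, List.replicate_succ]
      show pvAState (pvSmat vect1 vect2) t _ vect2.length = _
      rw [hIA]
      have : ((0 : Int) :: vals) ++ List.replicate (vect2.length - vect2.length) (0:Int)
          = 0 :: vals := by simp
      rw [this]
      have hnt2 : vect1.length - (t+1) = vect1.length - t - 1 := by omega
      rw [hnt2]
      simp
    · rw [hB1]
      rw [hcur, List.getD_append_right _ _ _ _ (by omega : R.length ≤ t+1)]
      rw [hRlen, Nat.sub_self]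
      rfl
    · rw [hB2]
      exact hflen'
    · intro j h1 h2
      rw [hB2]
      rw [hfv' j h1 h2, if_pos h2]
      apply pvFB_congr
      intro k hk
      simp only [pvGet2]
      rw [List.getD_append _ _ _ _ (by omega : k < R.length)]
    · rw [hB3]
      rw [hbest']
      have hRne : R.map pvListMax ≠ [] := by
        intro h
        have := List.map_eq_nil_iff.mp h
        rw [this] at hRlen
        simp at hRlen
      rw [List.map_append, List.map_singleton, pvListMax_snoc _ hRne]
      have hval0 : pvListMax (0 :: vals) = vals.foldl max 0 := rfl
      rw [hval0, hbest]
      -- pvListMax (R.map pvListMax) is ≥ 0: its first element is pvListMax of the zero row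
      have h0le : (0:Int) ≤ pvListMax (R.map pvListMax) := by
        cases R with
        | nil => simp at hRlen
        | cons r R' =>
          have hr : r = List.replicate (vect2.length + 1) (0:Int) := hR0
          rw [List.map_cons, hr, pvListMax_replicate_zero]
          show (0:Int) ≤ pvListMax (0 :: R'.map pvListMax)
          exact (PySem.List.le_foldl_max (R'.map pvListMax) 0).1
      exact pvFoldlMax_absorb vals _ 0 h0le

-- ===== VERDICT (by name: the statement is the Claim_ definition above) =====
theorem sw_dist_spec : Claim_equal_sw_dist := by
  unfold Claim_equal_sw_dist
  intro vect1 vect2 _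
  unfold Spec_sw_dist
  obtain ⟨R, hRlen, hR0, hA, hprev, hflen, hfv, hbest⟩ :=
    pv_outer_sim vect1 vect2 vect1.length (le_refl _)
  have hAeq : sw_dist vect1 vect2 = pvListMax ((pvAOuter vect1 vect2 vect1.length).map pvListMax) := rfl
  have hBeq : sw_dist_alt vect1 vect2 = (pvBOuter vect1 vect2 vect1.length).2.2 := by
    unfold sw_dist_alt pvBOuter
    rw [List.take_length]
  rw [hAeq, hBeq, hbest, hA, Nat.sub_self]
  simp
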